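-- pv_equiv track=rewrite | github.com/hongliangduan/HighFold2 | modify_code/colabfold/batch.py | msa_to_str
-- ===== SOURCE A (Python) =====
-- from typing import Any, Callable, Dict, List, Optional, Tuple, Union, TYPE_CHECKING
--
-- def pair_sequences(
--         a3m_lines: List[str], query_sequences: List[str], query_cardinality: List[int]
-- ) -> str:
--     a3m_line_paired = [""] * len(a3m_lines[0].splitlines())
--     for n, seq in enumerate(query_sequences):
--         lines = a3m_lines[n].splitlines()
--         for i, line in enumerate(lines):
--             if line.startswith(">"):
--                 if n != 0:
--                     line = line.replace(">", "\t", 1)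
--                 a3m_line_paired[i] = a3m_line_paired[i] + line
--             else:
--                 a3m_line_paired[i] = a3m_line_paired[i] + line * query_cardinality[n]
--     return "\n".join(a3m_line_paired)
--
-- def pad_sequences(
--         a3m_lines: List[str], query_sequences: List[str], query_cardinality: List[int]
-- ) -> str:
--     _blank_seq = [
--         ("-" * len(seq))
--         for n, seq in enumerate(query_sequences)
--         for _ in range(query_cardinality[n])
--     ]
--     a3m_lines_combined = []
--     pos = 0
--     for n, seq in enumerate(query_sequences):
--         for j in range(0, query_cardinality[n]):
--             lines = a3m_lines[n].split("\n")
--             for a3m_line in lines: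
--                 if len(a3m_line) == 0:
--                     continue
--                 if a3m_line.startswith(">"):
--                     a3m_lines_combined.append(a3m_line)
--                 else:
--                     a3m_lines_combined.append(
--                         "".join(_blank_seq[:pos] + [a3m_line] + _blank_seq[pos + 1:])
--                     )
--             pos += 1
--     return "\n".join(a3m_lines_combined)
--
-- def pair_msa(
--         query_seqs_unique: List[str],
--         query_seqs_cardinality: List[int],
--         paired_msa: Optional[List[str]],
--         unpaired_msa: Optional[List[str]],
-- ) -> str:
--     if paired_msa is None and unpaired_msa is not None:
--         a3m_lines = pad_sequences(
--             unpaired_msa, query_seqs_unique, query_seqs_cardinality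
--         )
--     elif paired_msa is not None and unpaired_msa is not None:
--         a3m_lines = (
--                 pair_sequences(paired_msa, query_seqs_unique, query_seqs_cardinality)
--                 + "\n"
--                 + pad_sequences(unpaired_msa, query_seqs_unique, query_seqs_cardinality)
--         )
--     elif paired_msa is not None and unpaired_msa is None:
--         a3m_lines = pair_sequences(
--             paired_msa, query_seqs_unique, query_seqs_cardinality
--         )
--     else:
--         raise ValueError(f"Invalid pairing")
--     return a3m_lines
--
-- def msa_to_str(
--         unpaired_msa: List[str],
--         paired_msa: List[str],
--         query_seqs_unique: List[str],
--         query_seqs_cardinality: List[int],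
-- ) -> str:
--     msa = "#" + ",".join(map(str, map(len, query_seqs_unique))) + "\t"
--     msa += ",".join(map(str, query_seqs_cardinality)) + "\n"
--     # build msa with cardinality of 1, it makes it easier to parse and manipulate
--     query_seqs_cardinality = [1 for _ in query_seqs_cardinality]
--     msa += pair_msa(query_seqs_unique, query_seqs_cardinality, paired_msa, unpaired_msa)
--     return msa
-- ===== SOURCE B (Python) =====
-- def msa_to_str(unpaired_msa, paired_msa, query_seqs_unique, query_seqs_cardinality):
--     header = ("#" + ",".join(str(len(s)) for s in query_seqs_unique) + "\t"
--               + ",".join(str(c) for c in query_seqs_cardinality) + "\n")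
--     n_seqs = len(query_seqs_unique)
--
--     # paired block: column-major — build each combined line by joining its pieces once
--     per = [paired_msa[n].splitlines() for n in range(n_seqs)]
--     width = len(paired_msa[0].splitlines())
--     paired_lines = []
--     for i in range(width):
--         pieces = []
--         for n in range(n_seqs):
--             if i < len(per[n]):
--                 line = per[n][i]
--                 if line.startswith(">") and n != 0:
--                     pieces.append("\t" + line[1:])
--                 else:
--                     pieces.append(line)
--         paired_lines.append("".join(pieces))
--
--     # unpaired block: precompute blank prefix/suffix strings per position once
--     blanks = ["-" * len(s) for s in query_seqs_unique]
--     pre = [""]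
--     for b in blanks:
--         pre.append(pre[-1] + b)
--     suf = [""] * (n_seqs + 1)
--     for n in range(n_seqs - 1, -1, -1):
--         suf[n] = blanks[n] + suf[n + 1]
--     pad_lines = []
--     for n in range(n_seqs):
--         p, s = pre[n], suf[n + 1]
--         for line in unpaired_msa[n].split("\n"):
--             if line:
--                 pad_lines.append(line if line.startswith(">") else p + line + s)
--
--     return header + "\n".join(paired_lines) + "\n" + "\n".join(pad_lines)
-- ===== Notes on version B (the rewrite author's own statement) =====
-- stated objective: faster
-- what changed: pad_sequences' per-line '"".join(_blank_seq[:pos] + [line] + _blank_seq[pos+1:])' (an O(N) slice-and-join for every MSA line) is replaced by blank prefix/suffix strings precomputed once per sequence position, and pair_sequences' index-wise string accumulation across sequences is replaced by a column-major pass that joins each combined line's pieces once.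
import Mathlib
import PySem

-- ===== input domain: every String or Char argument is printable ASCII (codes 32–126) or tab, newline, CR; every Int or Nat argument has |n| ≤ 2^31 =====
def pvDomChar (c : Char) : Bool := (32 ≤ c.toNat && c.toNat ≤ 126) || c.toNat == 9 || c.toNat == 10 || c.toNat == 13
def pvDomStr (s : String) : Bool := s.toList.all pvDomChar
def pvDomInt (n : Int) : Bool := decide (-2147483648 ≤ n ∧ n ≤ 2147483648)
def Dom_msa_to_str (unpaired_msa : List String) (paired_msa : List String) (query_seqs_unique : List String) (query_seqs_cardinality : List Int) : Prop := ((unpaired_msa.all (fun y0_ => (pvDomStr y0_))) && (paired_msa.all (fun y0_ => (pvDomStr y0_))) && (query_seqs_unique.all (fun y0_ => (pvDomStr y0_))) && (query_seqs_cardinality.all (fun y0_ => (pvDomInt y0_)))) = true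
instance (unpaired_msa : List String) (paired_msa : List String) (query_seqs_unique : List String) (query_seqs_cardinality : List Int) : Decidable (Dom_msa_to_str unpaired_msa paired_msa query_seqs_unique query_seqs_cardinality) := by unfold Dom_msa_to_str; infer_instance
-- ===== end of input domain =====

-- B replaces pad_sequences' per-line slice-and-join by precomputed blank prefix/suffix strings and
-- pair_sequences' index-wise string accumulation by a column-major join per output line (objective: faster).

-- ===== PORT A =====

-- line.replace(">", "\t", 1): exact for this call site, where old is the single character ">" and count is 1
def pvRepFirst : List Char → List Char
  | [] => []
  | ch :: r => if ch = '>' then '\t' :: r else ch :: pvRepFirst r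

def pvRepFirstS (s : String) : String := String.ofList (pvRepFirst s.toList)

-- pair_sequences(a3m_lines, query_sequences, query_cardinality); the assignment a3m_line_paired[i] = …
-- is List.set (Python raises IndexError out of range; Pre_ keeps every visited index in range)
def pvPairSeqA (a3m_lines : List String) (query_sequences : List String) (query_cardinality : List Int) : String :=
  let init : List String := List.replicate (PySem.Str.splitlines (PySem.List.pyGetD a3m_lines 0 "")).length ""
  let fin := (PySem.List.enumerate query_sequences).foldl (fun acc ns =>
    (PySem.List.enumerate (PySem.Str.splitlines (PySem.List.pyGetD a3m_lines ns.1 ""))).foldl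
      (fun acc2 il =>
        if PySem.Str.startswith il.2 ">" then
          acc2.set il.1.toNat (PySem.List.pyGetD acc2 il.1 "" ++ (if ns.1 ≠ 0 then pvRepFirstS il.2 else il.2))
        else
          -- line * query_cardinality[n] : string repetition = pyRepeat on the char list
          acc2.set il.1.toNat (PySem.List.pyGetD acc2 il.1 "" ++ String.ofList (PySem.List.pyRepeat il.2.toList (PySem.List.pyGetD query_cardinality ns.1 0))))
      acc) init
  PySem.Str.join "\n" fin

-- pad_sequences(a3m_lines, query_sequences, query_cardinality); split? "\n" is always some (sep ≠ "")
def pvPadSeqA (a3m_lines : List String) (query_sequences : List String) (query_cardinality : List Int) : String :=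
  let blank : List String := (PySem.List.enumerate query_sequences).flatMap (fun ns =>
    (PySem.List.pyRange 0 (PySem.List.pyGetD query_cardinality ns.1 0) 1).map
      (fun _ => String.ofList (List.replicate ns.2.toList.length '-')))
  let st := (PySem.List.enumerate query_sequences).foldl (fun st ns =>
    (PySem.List.pyRange 0 (PySem.List.pyGetD query_cardinality ns.1 0) 1).foldl (fun st2 _ =>
      (((PySem.Str.split? (PySem.List.pyGetD a3m_lines ns.1 "") "\n").getD []).foldl (fun acc line =>
        if PySem.Str.len line = 0 then acc
        else if PySem.Str.startswith line ">" then acc ++ [line]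
        else acc ++ [PySem.Str.join "" (PySem.List.slice blank none (some st2.2) ++ [line] ++ PySem.List.slice blank (some (st2.2 + 1)) none)])
        st2.1, st2.2 + 1)) st)
    (([] : List String), (0 : Int))
  PySem.Str.join "\n" st.1

-- msa_to_str: both msa arguments are plain lists (never None), so pair_msa always takes its
-- 'paired is not None and unpaired is not None' branch: pair_sequences(paired) + "\n" + pad_sequences(unpaired)
def msa_to_str (unpaired_msa : List String) (paired_msa : List String) (query_seqs_unique : List String) (query_seqs_cardinality : List Int) : String :=
  let msa := "#" ++ PySem.Str.join "," (query_seqs_unique.map (fun s => PySem.Int.toStr (PySem.Str.len s))) ++ "\t"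
             ++ PySem.Str.join "," (query_seqs_cardinality.map (fun n => PySem.Int.toStr n)) ++ "\n"
  let card1 : List Int := query_seqs_cardinality.map (fun _ => (1 : Int))
  msa ++ (pvPairSeqA paired_msa query_seqs_unique card1 ++ "\n" ++ pvPadSeqA unpaired_msa query_seqs_unique card1)

-- ===== PORT B =====

def pvTransformB (n : Nat) (line : String) : String :=
  if PySem.Str.startswith line ">" && n != 0 then "\t" ++ String.ofList (line.toList.drop 1) else line

-- one combined paired line: join of the pieces contributed by each sequence that still has line i
def pvColLine (per : List (List String)) (k : Nat) (i : Nat) : String :=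
  PySem.Str.join "" ((List.range k).filterMap (fun n => ((per.getD n [])[i]?).map (pvTransformB n)))

-- suffix pads, filled right to left: pvSufB blanks[k] = blanks[k] + blanks[k+1] + …
def pvSufB : List String → List String
  | [] => [""]
  | b :: r => (b ++ (pvSufB r).headD "") :: pvSufB r

def msa_to_str_alt (unpaired_msa : List String) (paired_msa : List String) (query_seqs_unique : List String) (query_seqs_cardinality : List Int) : String :=
  let header := "#" ++ PySem.Str.join "," (query_seqs_unique.map (fun s => PySem.Int.toStr (PySem.Str.len s))) ++ "\t"
             ++ PySem.Str.join "," (query_seqs_cardinality.map (fun n => PySem.Int.toStr n)) ++ "\n"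
  let nseqs := query_seqs_unique.length
  let per : List (List String) := (List.range nseqs).map (fun (n : Nat) => PySem.Str.splitlines (PySem.List.pyGetD paired_msa (n : Int) ""))
  let width := (PySem.Str.splitlines (PySem.List.pyGetD paired_msa 0 "")).length
  let paired_lines := (List.range width).map (fun i => pvColLine per nseqs i)
  let blanks := query_seqs_unique.map (fun s => String.ofList (List.replicate s.toList.length '-'))
  let pre := blanks.foldl (fun ps b => ps ++ [ps.getLastD "" ++ b]) [""]
  let suf := pvSufB blanks
  let pad_lines := (List.range nseqs).foldl (fun acc (n : Nat) =>
    (((PySem.Str.split? (PySem.List.pyGetD unpaired_msa (n : Int) "") "\n").getD []).foldl (fun acc2 line =>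
      if line ≠ "" then
        acc2 ++ [if PySem.Str.startswith line ">" then line else pre.getD n "" ++ line ++ suf.getD (n + 1) ""]
      else acc2) acc)) []
  header ++ PySem.Str.join "\n" paired_lines ++ "\n" ++ PySem.Str.join "\n" pad_lines

-- ===== PRECONDITION & SPEC =====
-- Exactly the inputs on which the Python A returns: pair_sequences indexes a3m_lines[0] (paired ≠ []),
-- both helpers index a3m_lines[n] / query_cardinality[n] for every n < len(query_seqs_unique), and
-- a3m_line_paired[i] is assigned for every line index of paired_msa[n], so no paired entry among the
-- first N may have more splitlines than paired_msa[0]; everywhere else A raises IndexError.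
def Pre_msa_to_str (unpaired_msa : List String) (paired_msa : List String) (query_seqs_unique : List String) (query_seqs_cardinality : List Int) : Prop :=
  paired_msa ≠ [] ∧
  query_seqs_unique.length ≤ paired_msa.length ∧
  query_seqs_unique.length ≤ unpaired_msa.length ∧
  query_seqs_unique.length ≤ query_seqs_cardinality.length ∧
  ∀ s ∈ paired_msa.take query_seqs_unique.length,
    (PySem.Str.splitlines s).length ≤ (PySem.Str.splitlines (paired_msa.headD "")).length
instance (unpaired_msa : List String) (paired_msa : List String) (query_seqs_unique : List String) (query_seqs_cardinality : List Int) : Decidable (Pre_msa_to_str unpaired_msa paired_msa query_seqs_unique query_seqs_cardinality) := by unfold Pre_msa_to_str; infer_instance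

def pvWitness_msa_to_str : List String × List String × List String × List Int :=
  ([">u0\nCC", ">u1\nGG"], [">p0\nAA", "\t p1\nGG"], ["AA", "GG"], [2, 1])

def Spec_msa_to_str (unpaired_msa : List String) (paired_msa : List String) (query_seqs_unique : List String) (query_seqs_cardinality : List Int) (out : String) : Prop := out = msa_to_str_alt unpaired_msa paired_msa query_seqs_unique query_seqs_cardinality
instance (unpaired_msa : List String) (paired_msa : List String) (query_seqs_unique : List String) (query_seqs_cardinality : List Int) (out : String) : Decidable (Spec_msa_to_str unpaired_msa paired_msa query_seqs_unique query_seqs_cardinality out) := by unfold Spec_msa_to_str; infer_instance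

-- ===== CLAIM (what is proved, stated in full; the proofs are below) =====
def Claim_equal_msa_to_str : Prop := ∀ (unpaired_msa : List String) (paired_msa : List String) (query_seqs_unique : List String) (query_seqs_cardinality : List Int), Dom_msa_to_str unpaired_msa paired_msa query_seqs_unique query_seqs_cardinality → Pre_msa_to_str unpaired_msa paired_msa query_seqs_unique query_seqs_cardinality → Spec_msa_to_str unpaired_msa paired_msa query_seqs_unique query_seqs_cardinality (msa_to_str unpaired_msa paired_msa query_seqs_unique query_seqs_cardinality)

-- ===== LEMMAS AND PROOFS =====

-- --- small string facts (everything through toList) ---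

theorem pv_sjoin_nil : PySem.Str.join "" [] = "" := by
  apply String.toList_inj.mp; simp [PySem.Chars.join_nil]

theorem pv_sjoin_cons (a : String) (l : List String) :
    PySem.Str.join "" (a :: l) = a ++ PySem.Str.join "" l := by
  apply String.toList_inj.mp
  cases l with
  | nil => simp [PySem.Chars.join_singleton, PySem.Chars.join_nil]
  | cons b r => simp [PySem.Chars.join_cons_cons]

theorem pv_sjoin_append (l1 l2 : List String) :
    PySem.Str.join "" (l1 ++ l2) = PySem.Str.join "" l1 ++ PySem.Str.join "" l2 := by
  induction l1 with
  | nil => simp [pv_sjoin_nil]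
  | cons a r ih => simp [pv_sjoin_cons, ih, String.append_assoc]

theorem pv_repFirst_gt (line : String) (h : PySem.Str.startswith line ">" = true) :
    pvRepFirstS line = "\t" ++ String.ofList (line.toList.drop 1) := by
  have h2 : (">".toList) <+: line.toList := (PySem.Chars.startswith_iff _ _).mp (by simpa using h)
  obtain ⟨t, ht⟩ := h2
  have ht' : line.toList = '>' :: t := by simpa using ht.symm
  apply String.toList_inj.mp
  simp [pvRepFirstS, ht', pvRepFirst]

-- A's inner piece, once the branch on startswith/n is pulled out of the assignment
def pvPieceA (card : List Int) (n : Int) (line : String) : String :=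
  if PySem.Str.startswith line ">" then (if n ≠ 0 then pvRepFirstS line else line)
  else String.ofList (PySem.List.pyRepeat line.toList (PySem.List.pyGetD card n 0))

theorem pv_pieceA_eq_transform (c : List Int) (k : Nat) (hk : k < c.length) (line : String) :
    pvPieceA (c.map (fun _ => (1 : Int))) (k : Int) line = pvTransformB k line := by
  simp only [pvPieceA, pvTransformB]
  cases hsc : PySem.Chars.startswith line.toList ['>'] with
  | false => simp [hsc, PySem.List.pyGetD_natCast, List.getD_eq_getElem?_getD, hk,
      PySem.List.pyRepeat]
  | true =>
    by_cases hk0 : k = 0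
    · simp [hsc, hk0]
    · have hki : (k : Int) ≠ 0 := by exact_mod_cast hk0
      have hrep := pv_repFirst_gt line (by simp [hsc])
      simp [hsc, hk0, hrep]

-- --- pair part ---

def pvColList (per : List (List String)) (W k : Nat) : List String :=
  (List.range W).map (fun i => pvColLine per k i)

theorem pv_pair_inner (f : String → String) (ls : List String) :
    ∀ (j : Nat) (acc : List String), j + ls.length ≤ acc.length →
    (PySem.List.enumerate ls (j : Int)).foldl
      (fun a il => a.set il.1.toNat (PySem.List.pyGetD a il.1 "" ++ f il.2)) acc
    = acc.take j ++ List.zipWith (fun a l => a ++ f l) (acc.drop j) ls ++ acc.drop (j + ls.length) := by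
  induction ls with
  | nil => intro j acc _; simp [PySem.List.enumerate]
  | cons l ls ih =>
    intro j acc h
    have hj : j < acc.length := by simp at h; omega
    have hcons : PySem.List.enumerate (l :: ls) (j : Int)
        = ((j : Int), l) :: PySem.List.enumerate ls ((j : Int) + 1) := by
      simp [PySem.List.enumerate]
    have hcast : ((j : Int) + 1) = ((j + 1 : Nat) : Int) := by push_cast; ring
    rw [hcons, List.foldl_cons, hcast]
    have hget : PySem.List.pyGetD acc (j : Int) "" = acc[j] := by
      simp [PySem.List.pyGetD_natCast, List.getD_eq_getElem?_getD, List.getElem?_eq_getElem hj]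
    have htn : ((j : Int)).toNat = j := Int.toNat_natCast j
    rw [htn, hget]
    rw [ih (j + 1) (acc.set j (acc[j] ++ f l)) (by simp; simp at h; omega)]
    have h1 : (acc.set j (acc[j] ++ f l)).take (j + 1) = acc.take j ++ [acc[j] ++ f l] := by
      rw [List.take_add_one]
      simp [List.take_set, List.getElem?_set_self', List.getElem?_eq_getElem hj]
      rw [List.set_eq_of_length_le (by simp)]
    have h2 : (acc.set j (acc[j] ++ f l)).drop (j + 1) = acc.drop (j + 1) :=
      List.drop_set_of_lt (by omega)
    have h3 : acc.drop j = acc[j] :: acc.drop (j + 1) := (List.getElem_cons_drop hj).symm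
    have h4 : (acc.set j (acc[j] ++ f l)).drop (j + 1 + ls.length) = acc.drop (j + (l :: ls).length) := by
      rw [List.drop_set_of_lt (by omega)]; congr 1; simp; omega
    rw [h1, h2, h4, h3, List.zipWith_cons_cons]
    simp [List.append_assoc]

theorem pv_colLine_succ (per : List (List String)) (j i : Nat) :
    pvColLine per (j + 1) i
      = pvColLine per j i ++ ((((per[j]?).getD [])[i]?).map (pvTransformB j)).getD "" := by
  simp only [pvColLine, List.range_succ, List.filterMap_append, pv_sjoin_append,
    List.getD_eq_getElem?_getD]
  congr 1
  cases h : (((per[j]?).getD [])[i]?).map (pvTransformB j) with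
  | none => simp [h, pv_sjoin_nil]
  | some y => simp [h, pv_sjoin_cons, pv_sjoin_nil, String.append_empty]

theorem pv_pair_outer (p : List String) (c : List Int) (N W : Nat)
    (hNp : N ≤ p.length) (hNc : N ≤ c.length)
    (hW : ∀ k < N, (PySem.Str.splitlines (PySem.List.pyGetD p (k : Int) "")).length ≤ W) :
    ∀ (qs' : List String) (j : Nat) (acc : List String), j + qs'.length = N →
    acc = pvColList ((List.range N).map (fun (n : Nat) => PySem.Str.splitlines (PySem.List.pyGetD p (n : Int) ""))) W j →
    (PySem.List.enumerate qs' (j : Int)).foldl (fun acc ns =>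
      (PySem.List.enumerate (PySem.Str.splitlines (PySem.List.pyGetD p ns.1 ""))).foldl
        (fun acc2 il =>
          if PySem.Str.startswith il.2 ">" then
            acc2.set il.1.toNat (PySem.List.pyGetD acc2 il.1 "" ++ (if ns.1 ≠ 0 then pvRepFirstS il.2 else il.2))
          else
            acc2.set il.1.toNat (PySem.List.pyGetD acc2 il.1 "" ++ String.ofList (PySem.List.pyRepeat il.2.toList (PySem.List.pyGetD (c.map (fun _ => (1:Int))) ns.1 0))))
        acc) acc
    = pvColList ((List.range N).map (fun (n : Nat) => PySem.Str.splitlines (PySem.List.pyGetD p (n : Int) ""))) W N := by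
  intro qs'
  induction qs' with
  | nil =>
    intro j acc hlen hacc
    simp only [List.length_nil, Nat.add_zero] at hlen
    subst hlen
    simpa [PySem.List.enumerate] using hacc
  | cons x r ih =>
    intro j acc hlen hacc
    have hjN : j < N := by simp at hlen; omega
    have hcons : PySem.List.enumerate (x :: r) (j : Int)
        = ((j : Int), x) :: PySem.List.enumerate r ((j : Int) + 1) := by
      simp [PySem.List.enumerate]
    rw [hcons, List.foldl_cons, show ((j : Int) + 1) = ((j + 1 : Nat) : Int) by push_cast; ring]
    set per := (List.range N).map (fun (n : Nat) => PySem.Str.splitlines (PySem.List.pyGetD p (n : Int) "")) with hper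
    set ls := PySem.Str.splitlines (PySem.List.pyGetD p (j : Int) "") with hls
    have hLW : ls.length ≤ W := hW j hjN
    have hacclen : acc.length = W := by rw [hacc]; simp [pvColList]
    -- the step function is the set/get/pvPieceA loop
    have hfn : (fun (acc2 : List String) (il : Int × String) =>
          if PySem.Str.startswith il.2 ">" then
            acc2.set il.1.toNat (PySem.List.pyGetD acc2 il.1 "" ++ (if (j : Int) ≠ 0 then pvRepFirstS il.2 else il.2))
          else
            acc2.set il.1.toNat (PySem.List.pyGetD acc2 il.1 "" ++ String.ofList (PySem.List.pyRepeat il.2.toList (PySem.List.pyGetD (c.map (fun _ => (1:Int))) (j : Int) 0))))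
        = (fun acc2 il => acc2.set il.1.toNat (PySem.List.pyGetD acc2 il.1 "" ++ pvPieceA (c.map (fun _ => (1:Int))) (j : Int) il.2)) := by
      funext acc2 il
      cases hss : PySem.Chars.startswith il.2.toList ['>'] <;> simp [pvPieceA, hss]
    rw [hfn]
    have hinner := pv_pair_inner (pvPieceA (c.map (fun _ => (1:Int))) (j : Int)) ls 0 acc
      (by omega)
    simp only [Nat.cast_zero, Nat.zero_add, List.take_zero, List.drop_zero, List.nil_append] at hinner
    rw [hinner]
    apply ih (j + 1) _ (by simp at hlen ⊢; omega)
    -- show the updated list is pvColList per W (j+1)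
    have hperj : (per[j]?).getD [] = ls := by
      rw [hper, hls, List.getElem?_map, List.getElem?_range hjN]
      simp
    have hzl : (List.zipWith (fun a l => a ++ pvPieceA (c.map (fun _ => (1:Int))) (j : Int) l) acc ls).length
        = ls.length := by
      simp [hacclen]; omega
    have hacci : ∀ m (hm : m < W), acc[m]'(by omega) = pvColLine per j m := by
      intro m hm
      have h1 : acc[m]'(by omega) = (pvColList per W j)[m]'(by simp [pvColList]; omega) :=
        List.getElem_of_eq hacc _
      rw [h1]
      simp [pvColList]
    apply List.ext_getElem
    · simp [pvColList, hacclen]; omega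
    · intro i hi1 hi2
      have hiW : i < W := by simpa [pvColList] using hi2
      have hrhs : (pvColList per W (j + 1))[i]'hi2 = pvColLine per (j + 1) i := by
        simp [pvColList]
      rw [hrhs, pv_colLine_succ, hperj]
      by_cases hiL : i < ls.length
      · rw [List.getElem_append_left (by omega)]
        rw [List.getElem_zipWith]
        rw [hacci i hiW, List.getElem?_eq_getElem hiL]
        have hjc : j < c.length := by omega
        rw [pv_pieceA_eq_transform c j hjc]
        simp
      · have hv : (List.zipWith (fun a l => a ++ pvPieceA (c.map (fun _ => (1:Int))) (j : Int) l) acc ls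
              ++ List.drop ls.length acc)[i]'hi1 = acc[i]'(by omega) := by
          have hq : (List.zipWith (fun a l => a ++ pvPieceA (c.map (fun _ => (1:Int))) (j : Int) l) acc ls
              ++ List.drop ls.length acc)[i]? = acc[i]? := by
            rw [List.getElem?_append_right (by omega)]
            rw [hzl, List.getElem?_drop]
            congr 1
            omega
          have hsome := List.getElem?_eq_getElem hi1
          rw [hq] at hsome
          rw [List.getElem?_eq_getElem (show i < acc.length by omega)] at hsome
          exact Option.some_injective _ hsome.symm
        rw [hv, hacci i hiW]
        rw [List.getElem?_eq_none (by omega)]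
        simp

-- --- pad part ---

theorem pv_blank_eq (c : List Int) :
    ∀ (qs' : List String) (j : Nat), j + qs'.length ≤ c.length →
    (PySem.List.enumerate qs' (j : Int)).flatMap (fun ns =>
      (PySem.List.pyRange 0 (PySem.List.pyGetD (c.map (fun _ => (1:Int))) ns.1 0) 1).map
        (fun _ => String.ofList (List.replicate ns.2.toList.length '-')))
    = qs'.map (fun s => String.ofList (List.replicate s.toList.length '-')) := by
  intro qs'
  induction qs' with
  | nil => intro j h; simp [PySem.List.enumerate]
  | cons x r ih =>
    intro j h
    have hcons : PySem.List.enumerate (x :: r) (j : Int)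
        = ((j : Int), x) :: PySem.List.enumerate r ((j : Int) + 1) := by
      simp [PySem.List.enumerate]
    have hjc : j < c.length := by simp at h; omega
    have hone : PySem.List.pyGetD (c.map (fun _ => (1:Int))) (j : Int) 0 = 1 := by
      simp [PySem.List.pyGetD_natCast, List.getD_eq_getElem?_getD, hjc]
    rw [hcons, List.flatMap_cons, show ((j : Int) + 1) = ((j + 1 : Nat) : Int) by push_cast; ring,
      ih (j + 1) (by simp at h ⊢; omega)]
    rw [hone]
    simp [show PySem.List.pyRange 0 1 1 = [0] from by decide]

def pvChain (s : String) : List String → List String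
  | [] => []
  | b :: r => (s ++ b) :: pvChain (s ++ b) r

theorem pv_pre_fold (bs : List String) : ∀ (init : List String), init ≠ [] →
    bs.foldl (fun ps b => ps ++ [ps.getLastD "" ++ b]) init = init ++ pvChain (init.getLastD "") bs := by
  induction bs with
  | nil => intro init _; simp [pvChain]
  | cons b r ih =>
    intro init _
    rw [List.foldl_cons, ih (init ++ [init.getLastD "" ++ b]) (by simp)]
    have hlast : (init ++ [init.getLastD "" ++ b]).getLastD "" = init.getLastD "" ++ b := by
      simp
    rw [hlast]
    simp [pvChain]

theorem pv_chain_getD (bs : List String) : ∀ (s : String) (k : Nat), k < bs.length →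
    (pvChain s bs).getD k "" = s ++ PySem.Str.join "" (bs.take (k + 1)) := by
  induction bs with
  | nil => intro s k h; simp at h
  | cons b r ih =>
    intro s k h
    cases k with
    | zero =>
      cases r with
      | nil => simp [pvChain, pv_sjoin_cons, pv_sjoin_nil, String.append_empty]
      | cons b2 r2 => simp [pvChain, pv_sjoin_cons, pv_sjoin_nil, String.append_empty]
    | succ k =>
      simp only [pvChain, List.getD_cons_succ]
      rw [ih (s ++ b) k (by simpa using h)]
      rw [List.take_succ_cons, pv_sjoin_cons]
      simp [String.append_assoc]

theorem pv_pre_getD (bs : List String) (k : Nat) (hk : k ≤ bs.length) :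
    (bs.foldl (fun ps b => ps ++ [ps.getLastD "" ++ b]) [""]).getD k "" = PySem.Str.join "" (bs.take k) := by
  rw [pv_pre_fold bs [""] (by simp)]
  cases k with
  | zero => simp [pv_sjoin_nil]
  | succ k =>
    have hk' : k < bs.length := by omega
    have : (([""] : List String) ++ pvChain (([""] : List String).getLastD "") bs).getD (k + 1) ""
        = (pvChain "" bs).getD k "" := by simp
    rw [this, pv_chain_getD bs "" k hk']
    simp

theorem pv_suf_getD (bs : List String) : ∀ (k : Nat),
    (pvSufB bs).getD k "" = PySem.Str.join "" (bs.drop k) := by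
  induction bs with
  | nil => intro k; cases k <;> simp [pvSufB, pv_sjoin_nil]
  | cons b r ih =>
    intro k
    cases k with
    | zero =>
      have hne : pvSufB r ≠ [] := by cases r <;> simp [pvSufB]
      have hhead : (pvSufB r).headD "" = PySem.Str.join "" r := by
        have h0 := ih 0
        cases hh : pvSufB r with
        | nil => exact absurd hh hne
        | cons a t =>
          rw [hh] at h0
          simpa using h0
      show ((b ++ (pvSufB r).headD "") :: pvSufB r).getD 0 "" = PySem.Str.join "" (List.drop 0 (b :: r))
      rw [List.getD_cons_zero, hhead, List.drop_zero, pv_sjoin_cons]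
    | succ k =>
      show ((b ++ (pvSufB r).headD "") :: pvSufB r).getD (k + 1) "" = _
      rw [List.getD_cons_succ, ih k, List.drop_succ_cons]

theorem pv_pad_loop (u : List String) (c : List Int) (B_ : List String) :
    ∀ (qs' : List String) (j : Nat) (acc : List String), j + qs'.length ≤ c.length →
    (PySem.List.enumerate qs' (j : Int)).foldl (fun st ns =>
      (PySem.List.pyRange 0 (PySem.List.pyGetD (c.map (fun _ => (1:Int))) ns.1 0) 1).foldl (fun st2 _ =>
        (((PySem.Str.split? (PySem.List.pyGetD u ns.1 "") "\n").getD []).foldl (fun acc line =>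
          if PySem.Str.len line = 0 then acc
          else if PySem.Str.startswith line ">" then acc ++ [line]
          else acc ++ [PySem.Str.join "" (PySem.List.slice B_ none (some st2.2) ++ [line] ++ PySem.List.slice B_ (some (st2.2 + 1)) none)])
          st2.1, st2.2 + 1)) st)
      (acc, (j : Int))
    = ((List.range' j qs'.length).foldl (fun acc (n : Nat) =>
        (((PySem.Str.split? (PySem.List.pyGetD u (n : Int) "") "\n").getD []).foldl (fun acc2 line =>
          if line ≠ "" then
            acc2 ++ [if PySem.Str.startswith line ">" then line
                     else PySem.Str.join "" (B_.take n) ++ line ++ PySem.Str.join "" (B_.drop (n + 1))]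
          else acc2) acc)) acc, ((j + qs'.length : Nat) : Int)) := by
  intro qs'
  induction qs' with
  | nil => intro j acc _; simp [PySem.List.enumerate]
  | cons x r ih =>
    intro j acc h
    have hcons : PySem.List.enumerate (x :: r) (j : Int)
        = ((j : Int), x) :: PySem.List.enumerate r ((j : Int) + 1) := by
      simp [PySem.List.enumerate]
    have hjc : j < c.length := by simp at h; omega
    have hone : PySem.List.pyGetD (c.map (fun _ => (1:Int))) (j : Int) 0 = 1 := by
      simp [PySem.List.pyGetD_natCast, List.getD_eq_getElem?_getD, hjc]
    rw [hcons, List.foldl_cons]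
    rw [hone, show PySem.List.pyRange 0 1 1 = [0] from by decide]
    simp only [List.foldl_cons, List.foldl_nil]
    have hsl1 : PySem.List.slice B_ none (some ((j : Int))) = B_.take j := by
      rw [PySem.List.slice_to B_ (by positivity)]
      simp
    have hsl2 : PySem.List.slice B_ (some ((j : Int) + 1)) none = B_.drop (j + 1) := by
      rw [show ((j : Int) + 1) = ((j + 1 : Nat) : Int) by push_cast; ring]
      rw [PySem.List.slice_from B_ (by positivity)]
      simp
    have hf : (fun (acc : List String) (line : String) =>
          if PySem.Str.len line = 0 then acc
          else if PySem.Str.startswith line ">" then acc ++ [line]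
          else acc ++ [PySem.Str.join "" (PySem.List.slice B_ none (some ((j : Int))) ++ [line] ++ PySem.List.slice B_ (some ((j : Int) + 1)) none)])
        = (fun acc2 line =>
          if line ≠ "" then
            acc2 ++ [if PySem.Str.startswith line ">" then line
                     else PySem.Str.join "" (B_.take j) ++ line ++ PySem.Str.join "" (B_.drop (j + 1))]
          else acc2) := by
      funext acc0 line
      have hjoin : PySem.Str.join "" (B_.take j ++ line :: B_.drop (j + 1))
          = PySem.Str.join "" (B_.take j) ++ line ++ PySem.Str.join "" (B_.drop (j + 1)) := by
        rw [pv_sjoin_append, pv_sjoin_cons, String.append_assoc]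
      by_cases hl : line = ""
      · subst hl
        simp [PySem.Str.len_eq]
      · have hlen : ¬ (PySem.Str.len line = 0) := by
          simp only [PySem.Str.len_eq, Nat.cast_eq_zero, List.length_eq_zero_iff]
          intro hh
          exact hl (String.toList_inj.mp (by simpa using hh))
        cases hst : PySem.Chars.startswith line.toList ['>'] with
        | true => simp [hl, hst]
        | false => simp [hl, hst, hsl1, hsl2, hjoin]
    rw [hf]
    rw [show ((j : Int) + 1) = ((j + 1 : Nat) : Int) by push_cast; ring]
    rw [ih (j + 1) _ (by simp at h ⊢; omega)]
    simp only [List.length_cons]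
    rw [List.range'_succ, List.foldl_cons,
      show ((j + 1) + r.length : Nat) = j + (r.length + 1) from by omega]

theorem pv_pad_eq (u : List String) (q : List String) (c : List Int)
    (hNc : q.length ≤ c.length) :
    pvPadSeqA u q (c.map (fun _ => (1:Int)))
    = PySem.Str.join "\n"
        ((List.range q.length).foldl (fun acc (n : Nat) =>
          (((PySem.Str.split? (PySem.List.pyGetD u (n : Int) "") "\n").getD []).foldl (fun acc2 line =>
            if line ≠ "" then
              acc2 ++ [if PySem.Str.startswith line ">" then line
                       else ((q.map (fun s => String.ofList (List.replicate s.toList.length '-'))).foldl (fun ps b => ps ++ [ps.getLastD "" ++ b]) [""]).getD n "" ++ line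
                            ++ (pvSufB (q.map (fun s => String.ofList (List.replicate s.toList.length '-')))).getD (n + 1) ""]
            else acc2) acc)) []) := by
  have hblank := pv_blank_eq c q 0 (by simpa using hNc)
  have hloop := pv_pad_loop u c (q.map (fun s => String.ofList (List.replicate s.toList.length '-'))) q 0 [] (by simpa using hNc)
  simp only [Nat.cast_zero, Nat.zero_add, ] at hblank hloop
  simp only [pvPadSeqA]
  rw [hblank, hloop]
  have hrange : List.range' 0 q.length = List.range q.length := (List.range_eq_range').symm
  rw [hrange]
  congr 1
  apply PySem.List.foldl_congr_mem
  intro acc0 n hn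
  have hnN : n < q.length := List.mem_range.mp hn
  have hpre := pv_pre_getD (q.map (fun s => String.ofList (List.replicate s.toList.length '-'))) n
    (by simp; omega)
  have hsuf := pv_suf_getD (q.map (fun s => String.ofList (List.replicate s.toList.length '-'))) (n + 1)
  simp only [hpre, hsuf]

-- ===== VERDICT (by name: the statement is the Claim_ definition above) =====
theorem msa_to_str_spec : Claim_equal_msa_to_str := by
  intro u p q c _hdom hpre
  obtain ⟨hne, hNp, hNu, hNc, htake⟩ := hpre
  show msa_to_str u p q c = msa_to_str_alt u p q c
  have hp0 : PySem.List.pyGetD p 0 "" = p.headD "" := by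
    cases p with
    | nil => exact absurd rfl hne
    | cons a t =>
      rw [show (0 : Int) = ((0 : Nat) : Int) by norm_num, PySem.List.pyGetD_natCast]
      rfl
  have hW : ∀ k < q.length,
      (PySem.Str.splitlines (PySem.List.pyGetD p (k : Int) "")).length
        ≤ (PySem.Str.splitlines (PySem.List.pyGetD p 0 "")).length := by
    intro k hk
    have hkp : k < p.length := by omega
    have hget : PySem.List.pyGetD p (k : Int) "" = p[k] := by
      simp [PySem.List.pyGetD_natCast, List.getD_eq_getElem?_getD, List.getElem?_eq_getElem hkp]
    have hmem : p[k] ∈ p.take q.length := by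
      have h1 : (p.take q.length)[k]'(by simp; omega) = p[k] := List.getElem_take
      rw [← h1]
      exact List.getElem_mem _
    have := htake _ hmem
    rw [hget, hp0]
    exact this
  have hinit : (List.replicate (PySem.Str.splitlines (PySem.List.pyGetD p 0 "")).length "")
      = pvColList ((List.range q.length).map (fun (n : Nat) => PySem.Str.splitlines (PySem.List.pyGetD p (n : Int) "")))
          (PySem.Str.splitlines (PySem.List.pyGetD p 0 "")).length 0 := by
    simp [pvColList, pvColLine, pv_sjoin_nil, List.map_const']
  have hpair := pv_pair_outer p c q.length (PySem.Str.splitlines (PySem.List.pyGetD p 0 "")).length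
    hNp hNc hW q 0 _ (by simp) hinit
  simp only [Nat.cast_zero] at hpair
  have hpad := pv_pad_eq u q c hNc
  simp only [msa_to_str, msa_to_str_alt, pvPairSeqA]
  rw [hpair, hpad]
  simp only [pvColList]
  simp only [String.append_assoc]
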